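-- pv_equiv track=rewrite | github.com/MiguelFaria57/EC-Immigrant_Insertion_in_Evolutionary_Algorithms | src/benchmarks.py | violations
-- ===== SOURCE A (Python) =====
-- def violations(indiv,comp):
--     v = 0
--     for elem in indiv:
--         limite = min(elem-1,comp-elem)
--         vi = 0
--         for j in range(1,limite+1):
--             if ((elem - j) in indiv) and ((elem+j) in indiv):
--                 vi += 1
--         v += vi
--     return v
-- ===== SOURCE B (Python) =====
-- def violations(indiv, comp):
--     # set of present values; enumerate present smaller partners instead of probing offsets
--     s = set(indiv)
--     v = 0
--     for elem in indiv:
--         for a in s: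
--             if 1 <= a < elem:
--                 b = 2 * elem - a
--                 if b <= comp and b in s:
--                     v += 1
--     return v
-- ===== Notes on version B (the rewrite author's own statement) =====
-- stated objective: alternative
-- what changed: Inner loop enumerates the distinct present values a < elem once from a prebuilt set and looks up the symmetric partner 2*elem-a, instead of probing every offset j in range(1, min(elem-1, comp-elem)+1) with two O(n) list-membership scans.
import Mathlib
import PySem

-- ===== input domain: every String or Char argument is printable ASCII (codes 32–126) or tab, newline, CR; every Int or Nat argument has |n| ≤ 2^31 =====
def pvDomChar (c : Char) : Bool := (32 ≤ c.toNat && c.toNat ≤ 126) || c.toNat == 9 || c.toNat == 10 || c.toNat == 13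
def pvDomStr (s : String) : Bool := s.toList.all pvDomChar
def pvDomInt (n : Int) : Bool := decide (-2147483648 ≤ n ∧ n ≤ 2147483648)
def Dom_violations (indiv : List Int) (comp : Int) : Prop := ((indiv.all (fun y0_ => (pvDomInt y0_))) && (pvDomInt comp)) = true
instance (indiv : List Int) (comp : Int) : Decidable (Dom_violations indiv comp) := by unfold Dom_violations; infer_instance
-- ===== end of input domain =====

-- B enumerates present smaller partners from a prebuilt set and looks up the symmetric complement,
-- instead of probing every offset with two list-membership scans (objective: alternative).

-- ===== PORT A =====
def violations (indiv : List Int) (comp : Int) : Int :=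
  indiv.foldl (fun v elem =>
    let limite := min (elem - 1) (comp - elem)
    let vi := (PySem.List.pyRange 1 (limite + 1) 1).foldl
      (fun vi j => if (elem - j) ∈ indiv ∧ (elem + j) ∈ indiv then vi + 1 else vi) 0
    v + vi) 0

-- ===== PORT B =====
def violations_alt (indiv : List Int) (comp : Int) : Int :=
  let s := PySem.Set.ofList indiv
  indiv.foldl (fun v elem =>
    s.foldl (fun v a =>
      if 1 ≤ a ∧ a < elem then
        let b := 2 * elem - a
        if b ≤ comp ∧ PySem.Set.contains s b then v + 1 else v
      else v) v) 0

-- ===== PRECONDITION & SPEC =====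
def Spec_violations (indiv : List Int) (comp : Int) (out : Int) : Prop := out = violations_alt indiv comp
instance (indiv : List Int) (comp : Int) (out : Int) : Decidable (Spec_violations indiv comp out) := by unfold Spec_violations; infer_instance

-- ===== CLAIM (what is proved, stated in full; the proofs are below) =====
def Claim_equal_violations : Prop := ∀ (indiv : List Int) (comp : Int), Dom_violations indiv comp → Spec_violations indiv comp (violations indiv comp)

-- ===== LEMMAS AND PROOFS =====

-- a counting fold equals start + countP
theorem pv_foldl_count (p : Int → Prop) [DecidablePred p] (l : List Int) (v : Int) :
    l.foldl (fun acc x => if p x then acc + 1 else acc) v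
      = v + (l.countP (fun x => decide (p x)) : Int) := by
  induction l generalizing v with
  | nil => simp
  | cons x xs ih =>
    simp only [List.foldl_cons, List.countP_cons, ih]
    by_cases h : p x <;> simp [h]
    ring

-- the inner counts agree: offsets j ↔ present smaller partners a = elem - j
theorem pv_inner (indiv : List Int) (comp elem : Int) :
    ((PySem.List.pyRange 1 (min (elem - 1) (comp - elem) + 1) 1).countP
        (fun j => decide ((elem - j) ∈ indiv ∧ (elem + j) ∈ indiv)))
      = ((PySem.Set.ofList indiv).countP
        (fun a => decide (1 ≤ a ∧ a < elem ∧ 2 * elem - a ≤ comp ∧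
            PySem.Set.contains (PySem.Set.ofList indiv) (2 * elem - a) = true))) := by
  rw [List.countP_eq_length_filter, List.countP_eq_length_filter]
  have hmap : (((PySem.List.pyRange 1 (min (elem - 1) (comp - elem) + 1) 1).filter
        (fun j => decide ((elem - j) ∈ indiv ∧ (elem + j) ∈ indiv))).map (fun j => elem - j)).Perm
      ((PySem.Set.ofList indiv).filter
        (fun a => decide (1 ≤ a ∧ a < elem ∧ 2 * elem - a ≤ comp ∧
            PySem.Set.contains (PySem.Set.ofList indiv) (2 * elem - a) = true))) := by
    apply (List.perm_ext_iff_of_nodup _ _).mpr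
    · intro x
      simp only [List.mem_map, List.mem_filter, PySem.List.mem_pyRange_one,
        decide_eq_true_eq, PySem.Set.mem_ofList, PySem.Set.contains_iff]
      constructor
      · rintro ⟨j, ⟨⟨hj1, hj2⟩, hin1, hin2⟩, rfl⟩
        refine ⟨hin1, by omega, by omega, by omega, ?_⟩
        have : 2 * elem - (elem - j) = elem + j := by ring
        rw [this]; exact hin2
      · rintro ⟨hx, h1, h2, h3, h4⟩
        refine ⟨elem - x, ⟨⟨by omega, by omega⟩, ?_, ?_⟩, by ring⟩
        · have : elem - (elem - x) = x := by ring
          rw [this]; exact hx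
        · have : elem + (elem - x) = 2 * elem - x := by ring
          rw [this]; exact h4
    · exact (PySem.List.nodup_pyRange_one 1 _ |>.filter _).map
        (fun a b h => by omega)
    · exact (PySem.Set.nodup_ofList indiv).filter _
  calc _ = (((PySem.List.pyRange 1 (min (elem - 1) (comp - elem) + 1) 1).filter
        (fun j => decide ((elem - j) ∈ indiv ∧ (elem + j) ∈ indiv))).map (fun j => elem - j)).length := by
          rw [List.length_map]
    _ = _ := hmap.length_eq

-- B's nested-if step is a counting step for one combined predicate
theorem pv_alt_step (indiv : List Int) (comp elem : Int) :
    (fun (v a : Int) =>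
      if 1 ≤ a ∧ a < elem then
        if 2 * elem - a ≤ comp ∧ PySem.Set.contains (PySem.Set.ofList indiv) (2 * elem - a) then v + 1 else v
      else v)
    = (fun (v a : Int) =>
      if 1 ≤ a ∧ a < elem ∧ 2 * elem - a ≤ comp ∧
          PySem.Set.contains (PySem.Set.ofList indiv) (2 * elem - a) = true then v + 1 else v) := by
  funext v a
  split_ifs <;> simp_all

-- ===== VERDICT (by name: the statement is the Claim_ definition above) =====
theorem violations_spec : Claim_equal_violations := by
  intro indiv comp _
  show violations indiv comp = violations_alt indiv comp
  unfold violations violations_alt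
  have hstep :
      (fun (v elem : Int) => v + (PySem.List.pyRange 1 (min (elem - 1) (comp - elem) + 1) 1).foldl
          (fun vi j => if (elem - j) ∈ indiv ∧ (elem + j) ∈ indiv then vi + 1 else vi) 0)
    = (fun (v elem : Int) => (PySem.Set.ofList indiv).foldl
          (fun v a => if 1 ≤ a ∧ a < elem then
              if 2 * elem - a ≤ comp ∧ PySem.Set.contains (PySem.Set.ofList indiv) (2 * elem - a) then v + 1 else v
            else v) v) := by
    funext v elem
    rw [pv_foldl_count, pv_alt_step indiv comp elem, pv_foldl_count, pv_inner indiv comp elem]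
    omega
  exact congrArg (fun f => List.foldl f 0 indiv) hstep
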